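-- pv_equiv track=rewrite | github.com/Brendonk13/py-demystify | src/helpers.py | cleanup_source_code
-- ===== SOURCE A (Python) =====
-- def cleanup_source_code(source_code):
--     cleaned = []
--
--     ongoing_line = ""
--     for line in source_code:
--         if line.endswith("\n"):
--             # If the string ends with "\n", add the current line to result
--             if ongoing_line:
--                 cleaned.append(ongoing_line)
--                 ongoing_line = ""
--             cleaned.append(line)  # Add the current string as a standalone line
--         else:
--             # Concatenate the string to the current line
--             ongoing_line += line
--
--     # Add the last accumulated line if any
--     if ongoing_line:
--         cleaned.append(ongoing_line)
--     return cleaned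
-- ===== SOURCE B (Python) =====
-- def cleanup_source_code(source_code):
--     # Run-grouping rewrite: scan by index, join each maximal run of
--     # non-newline-terminated fragments at once instead of accumulating.
--     cleaned = []
--     i, n = 0, len(source_code)
--     while i < n:
--         if source_code[i].endswith("\n"):
--             cleaned.append(source_code[i])
--             i += 1
--         else:
--             j = i
--             while j < n and not source_code[j].endswith("\n"):
--                 j += 1
--             joined = "".join(source_code[i:j])
--             if joined:
--                 cleaned.append(joined)
--             i = j
--     return cleaned
-- ===== Notes on version B (the rewrite author's own statement) =====
-- stated objective: alternative
-- what changed: Replaces A's accumulator-and-flush fold with index-based run grouping: each maximal run of non-newline-terminated fragments is located and joined with ''.join in one step.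
import Mathlib
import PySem

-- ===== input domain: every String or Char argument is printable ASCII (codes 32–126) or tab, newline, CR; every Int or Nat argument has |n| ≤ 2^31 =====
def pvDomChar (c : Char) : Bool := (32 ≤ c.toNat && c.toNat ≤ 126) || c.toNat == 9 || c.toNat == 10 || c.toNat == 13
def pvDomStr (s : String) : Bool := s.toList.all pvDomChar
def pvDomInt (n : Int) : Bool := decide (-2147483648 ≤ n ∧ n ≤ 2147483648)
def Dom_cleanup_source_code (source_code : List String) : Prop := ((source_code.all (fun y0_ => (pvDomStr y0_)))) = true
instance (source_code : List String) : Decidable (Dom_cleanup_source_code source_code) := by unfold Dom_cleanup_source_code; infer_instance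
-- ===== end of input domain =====

-- B replaces A's accumulator-and-flush fold with index-based run grouping (joining each
-- maximal run of fragments at once); alternative decomposition, same cost.

-- ===== PORT A =====
-- one iteration of A's for-loop over state (cleaned, ongoing_line)
def aStep (st : List String × String) (line : String) : List String × String :=
  if PySem.Str.endswith line "\n" then
    ((if st.2 ≠ "" then st.1 ++ [st.2] else st.1) ++ [line], "")
  else
    (st.1, st.2 ++ line)

def cleanup_source_code (source_code : List String) : List String :=
  let st := source_code.foldl aStep ([], "")
  if st.2 ≠ "" then st.1 ++ [st.2] else st.1

-- ===== PORT B =====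
-- the inner while-loop's continuation test: line does NOT end with "\n"
def bFrag (s : String) : Bool := !PySem.Str.endswith s "\n"

-- B's outer while-loop: the list from index i onward is the argument
def bGo : List String → List String
  | [] => []
  | l :: ls =>
    if PySem.Str.endswith l "\n" then
      l :: bGo ls
    else
      let joined := PySem.Str.join "" ((l :: ls).takeWhile bFrag)
      (if joined ≠ "" then [joined] else []) ++ bGo ((l :: ls).dropWhile bFrag)
termination_by xs => xs.length
decreasing_by
  · simp
  · rename_i h
    rw [List.dropWhile_cons_of_pos (by simp only [bFrag, Bool.not_eq_eq_eq_not, Bool.not_true]; simpa using h)]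
    exact Nat.lt_succ_of_le (List.length_dropWhile_le _ _)

def cleanup_source_code_alt (source_code : List String) : List String :=
  bGo source_code

-- ===== PRECONDITION & SPEC =====
def Spec_cleanup_source_code (source_code : List String) (out : List String) : Prop := out = cleanup_source_code_alt source_code
instance (source_code : List String) (out : List String) : Decidable (Spec_cleanup_source_code source_code out) := by unfold Spec_cleanup_source_code; infer_instance

-- ===== CLAIM (what is proved, stated in full; the proofs are below) =====
def Claim_equal_cleanup_source_code : Prop := ∀ (source_code : List String), Dom_cleanup_source_code source_code → Spec_cleanup_source_code source_code (cleanup_source_code source_code)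

-- ===== LEMMAS AND PROOFS =====

-- A's loop followed by the final flush, with ongoing_line generalized
def aFin (o : String) (xs : List String) : List String :=
  let st := xs.foldl aStep ([], o)
  if st.2 ≠ "" then st.1 ++ [st.2] else st.1

theorem str_append_empty (s : String) : s ++ "" = s := by
  apply String.ext; simp

theorem str_append_assoc (a b c : String) : a ++ b ++ c = a ++ (b ++ c) := by
  apply String.ext; simp

theorem join_empty_nil : PySem.Str.join "" ([] : List String) = "" := rfl

theorem join_empty_cons (x : String) (l : List String) :
    PySem.Str.join "" (x :: l) = x ++ PySem.Str.join "" l := by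
  apply String.ext
  simp only [PySem.Str.toList_join, PySem.Chars.join, List.intercalate, List.map_cons,
    String.toList_append]
  induction l with
  | nil => simp
  | cons y ys ih => simp

theorem foldl_shift (xs : List String) (c : List String) (o : String) :
    xs.foldl aStep (c, o) =
      (c ++ (xs.foldl aStep ([], o)).1, (xs.foldl aStep ([], o)).2) := by
  induction xs generalizing c o with
  | nil => simp
  | cons x xs ih =>
    simp only [List.foldl_cons, aStep]
    by_cases h : PySem.Str.endswith x "\n" = true
    · simp only [h, if_true]
      rw [ih ((if o ≠ "" then c ++ [o] else c) ++ [x]) "",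
          ih ((if o ≠ "" then [] ++ [o] else []) ++ [x]) ""]
      split_ifs <;> simp
    · simp only [h, Bool.false_eq_true, if_false]
      exact ih c (o ++ x)

theorem aFin_cons_nl (x : String) (xs : List String) (o : String)
    (h : PySem.Str.endswith x "\n" = true) :
    aFin o (x :: xs) = (if o ≠ "" then [o] else []) ++ x :: aFin "" xs := by
  simp only [aFin, List.foldl_cons, aStep, h, if_true]
  rw [foldl_shift]
  split_ifs <;> simp

theorem aFin_cons_frag (x : String) (xs : List String) (o : String)
    (h : PySem.Str.endswith x "\n" = false) :
    aFin o (x :: xs) = aFin (o ++ x) xs := by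
  simp only [aFin, List.foldl_cons, aStep, h, Bool.false_eq_true, if_false]

theorem bFrag_true (x : String) (h : PySem.Str.endswith x "\n" = false) :
    bFrag x = true := by
  simp only [bFrag, h, Bool.not_false]

theorem bFrag_false (x : String) (h : PySem.Str.endswith x "\n" = true) :
    bFrag x = false := by
  simp only [bFrag, h, Bool.not_true]

theorem aFin_run (xs : List String) (o : String) :
    aFin o xs =
      (if o ++ PySem.Str.join "" (xs.takeWhile bFrag) ≠ "" then
        [o ++ PySem.Str.join "" (xs.takeWhile bFrag)] else []) ++
      aFin "" (xs.dropWhile bFrag) := by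
  induction xs generalizing o with
  | nil =>
    simp only [List.takeWhile_nil, List.dropWhile_nil, join_empty_nil, str_append_empty]
    simp only [aFin, List.foldl_nil]
    split_ifs <;> simp_all
  | cons x xs ih =>
    by_cases h : PySem.Str.endswith x "\n" = true
    · have hb := bFrag_false x h
      rw [List.takeWhile_cons_of_neg (by simp [hb]), List.dropWhile_cons_of_neg (by simp [hb])]
      rw [aFin_cons_nl x xs o h, aFin_cons_nl x xs "" h]
      simp only [join_empty_nil, str_append_empty]
      split_ifs <;> simp_all
    · have h' : PySem.Str.endswith x "\n" = false := by simpa using h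
      have hb := bFrag_true x h'
      rw [List.takeWhile_cons_of_pos (by simp [hb]), List.dropWhile_cons_of_pos (by simp [hb])]
      rw [aFin_cons_frag x xs o h', ih (o ++ x), join_empty_cons, ← str_append_assoc]

theorem aFin_eq_bGo (xs : List String) : aFin "" xs = bGo xs := by
  induction xs using bGo.induct with
  | case1 => rw [bGo]; simp [aFin]
  | case2 l ls h ih =>
    rw [bGo, if_pos h, aFin_cons_nl l ls "" h, ih]
    simp
  | case3 l ls h ih =>
    have h' : PySem.Str.endswith l "\n" = false := by simpa using h
    have hb := bFrag_true l h'
    rw [bGo, if_neg h, aFin_run]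
    rw [List.dropWhile_cons_of_pos (by simp [hb])]
    rw [List.takeWhile_cons_of_pos (by simp [hb]), join_empty_cons]
    rw [List.dropWhile_cons_of_pos (by simp [hb])] at ih
    rw [ih]
    have he : ("" : String) ++ (l ++ PySem.Str.join "" (ls.takeWhile bFrag)) =
        l ++ PySem.Str.join "" (ls.takeWhile bFrag) := by
      apply String.ext; simp
    rw [he]

-- ===== VERDICT (by name: the statement is the Claim_ definition above) =====
theorem cleanup_source_code_spec : Claim_equal_cleanup_source_code := by
  intro xs _
  show cleanup_source_code xs = cleanup_source_code_alt xs
  have h0 : cleanup_source_code xs = aFin "" xs := rfl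
  rw [h0, aFin_eq_bGo]
  rfl
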